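-- pv_equiv track=rewrite | github.com/MinKyeom/KMK-DREAM | Programmers/lv3/에어컨.py | solution
-- ===== SOURCE A (Python) =====
-- from collections import deque
-- from collections import deque
--
-- def solution(temperature, t1, t2, a, b, onboard):
--     result = 0  # 전력소모량
--     p = onboard  # 승객 탑승 여부
--     t = temperature  # temperature: 실외온도
--     now = temperature  # 현재기온
--     # want: 희망온도 off: 전원 temperature: 시간에 따른 온도
--     check = [[now, temperature, "off"] for _ in range(len(p))]  # 시간에 따른 에어컨 전원 및 온도 변경여부 0,1,-1
--
--     #### 목표 ####
--     # 승객이 탑승중일때 최적화된 실내 온도를 최소의 전력으로 맞추기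
--     # 승객이 탑승할때도 에어컨이 켜져있다면 외부 온도와 관계없이 에어컨의 조건에 따른다!
--     # 사이인거 등호 포함!
--     # 더 더울경우 t2 추울경우 t1
--     # 탑승객이 없을경우 최적화를 맞출 필요가 없다 그래야 최소 전력 가능!
--     # 변화가 생기기 직전에 에어컨 on
--     #################################
--
--     # 기준점 t: 현재 온도
--
--     ####
--     # 온도를 선택하는 방법 중 전력이 최소로 드는걸 선택
--     # [현재온도, 전력]으로 이루어진 리스트를 활용하여 체크
--
--     count = 0
--     # [현재기온,전력,시간]
--     q = deque([[now, 0, 0]])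
--     result = []
--
--     while q:
--         c, e, time = q.popleft()
--
--         # 최적화 온도 여부 체크
--         if not t1 <= c <= t2 and p[time] == 1:
--             continue
--
--         if time == len(p) - 1:
--             result.append(e)
--             continue
--
--         # 에어컨 off 경우
--         if c == t:
--             q.append([c, e, time + 1])
--         elif c > t:
--             q.append([c - 1, e, time + 1])
--         elif c < t:
--             q.append([c + 1, e, time + 1])
--
--         # 에어컨 on 경우 변동
--         if c > t2:
--             q.append([c - 1, e + a, time + 1])
--         elif c < t1:
--             q.append([c + 1, e + a, time + 1])
--         elif t1 <= c <= t2: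
--             q.append([c, e + b, time + 1])
--             q.append([c + 1, e + a, time + 1])
--             q.append([c - 1, e + a, time + 1])
--
--     return min(result)
-- ===== SOURCE B (Python) =====
-- def solution(temperature, t1, t2, a, b, onboard):
--     # Backward dynamic programming over (time, cabin temperature) instead of
--     # exhaustive BFS over all control sequences: O(n^2) states/edges.
--     t = temperature
--     n = len(onboard)
--
--     def alive(i, c):
--         # the state survives A's comfort check at time i
--         return t1 <= c <= t2 or onboard[i] != 1
--
--     def moves(c):
--         # (next temperature, energy cost) transitions available from c
--         ms = [(c - 1, 0) if c > t else (c + 1, 0) if c < t else (c, 0)]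
--         if c > t2:
--             ms.append((c - 1, a))
--         elif c < t1:
--             ms.append((c + 1, a))
--         elif t1 <= c <= t2:
--             ms += [(c, b), (c + 1, a), (c - 1, a)]
--         return ms
--
--     # cur[c] = minimal future energy from (time i, temp c); None = no valid schedule
--     cur = {c: (0 if alive(n - 1, c) else None) for c in range(t - (n - 1), t + n)}
--     for k in range(1, n):
--         i = n - 1 - k
--         nxt = {}
--         for c in range(t - i, t + i + 1):
--             if not alive(i, c):
--                 nxt[c] = None
--             else:
--                 best = None
--                 for c2, w in moves(c):
--                     v = cur[c2]
--                     if v is not None and (best is None or w + v < best):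
--                         best = w + v
--                 nxt[c] = best
--         cur = nxt
--     return cur[t]
-- ===== Notes on version B (the rewrite author's own statement) =====
-- stated objective: faster
-- what changed: Replaced A's exhaustive BFS over all control sequences (one queue entry per path) by a backward dynamic program that keeps one minimal-future-energy value per (time, temperature) state.
-- outside the precondition, e.g. on solution(0, -2, 2, 3, 1, []): A raises IndexError, B raises KeyError; on solution(9, -2, 2, 3, 1, [1]): A raises ValueError, B returns None
import Mathlib
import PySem

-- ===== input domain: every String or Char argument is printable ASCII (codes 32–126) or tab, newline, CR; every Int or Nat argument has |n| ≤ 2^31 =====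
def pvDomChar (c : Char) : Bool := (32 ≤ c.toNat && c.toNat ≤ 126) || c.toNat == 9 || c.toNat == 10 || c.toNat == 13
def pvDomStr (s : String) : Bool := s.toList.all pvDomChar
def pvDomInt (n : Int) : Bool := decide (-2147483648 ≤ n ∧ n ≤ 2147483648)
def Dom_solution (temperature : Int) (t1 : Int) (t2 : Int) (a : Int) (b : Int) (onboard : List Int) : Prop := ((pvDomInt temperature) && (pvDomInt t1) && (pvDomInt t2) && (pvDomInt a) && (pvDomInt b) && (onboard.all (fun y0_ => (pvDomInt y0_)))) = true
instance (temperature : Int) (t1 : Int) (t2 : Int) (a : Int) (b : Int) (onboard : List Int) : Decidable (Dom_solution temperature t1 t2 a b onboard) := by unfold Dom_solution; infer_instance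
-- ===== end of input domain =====

-- B replaces A's exhaustive BFS over all control sequences by a backward DP keeping one
-- minimal-future-energy value per (time, temperature) state (objective: faster, asymptotic).

-- ===== PORT A =====
-- A explores every aircon on/off choice with a FIFO queue of [temp, energy, time] entries and
-- returns the minimum of all collected final energies.  `time` is carried as `Fin p.length`
-- (Python's `time` always stays in range); termination is by a weighted queue measure.
def bfsA (t t1 t2 a b : Int) (p : List Int) :
    List (Int × Int × Fin p.length) → List Int → List Int
  | [], result => result
  | (c, e, time) :: q, result =>
    if ¬ (t1 ≤ c ∧ c ≤ t2) ∧ PySem.List.pyGetD p (time.val : Int) 0 = 1 then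
      bfsA t t1 t2 a b p q result
    else if htime : (time.val : Int) = (p.length : Int) - 1 then
      bfsA t t1 t2 a b p q (result ++ [e])
    else
      have hlt : time.val + 1 < p.length := by
        have := time.isLt; omega
      bfsA t t1 t2 a b p
        (q ++ (if c = t then [(c, e, (⟨time.val + 1, hlt⟩ : Fin p.length))]
               else if c > t then [(c - 1, e, ⟨time.val + 1, hlt⟩)]
               else [(c + 1, e, ⟨time.val + 1, hlt⟩)])
           ++ (if c > t2 then [(c - 1, e + a, ⟨time.val + 1, hlt⟩)]
               else if c < t1 then [(c + 1, e + a, ⟨time.val + 1, hlt⟩)]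
               else if t1 ≤ c ∧ c ≤ t2 then
                 [(c, e + b, ⟨time.val + 1, hlt⟩), (c + 1, e + a, ⟨time.val + 1, hlt⟩),
                  (c - 1, e + a, ⟨time.val + 1, hlt⟩)]
               else [])) result
  termination_by q _ => (q.map (fun x => 5 ^ (p.length - 1 - x.2.2.val))).sum
  decreasing_by
    · simp
    · simp
    · have hK : p.length - 1 - time.val = (p.length - 1 - (time.val + 1)) + 1 := by omega
      have hpow : 5 ^ (p.length - 1 - time.val) = 5 * 5 ^ (p.length - 1 - (time.val + 1)) := by
        rw [hK, pow_succ]; ring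
      have h5 : 0 < 5 ^ (p.length - 1 - (time.val + 1)) := Nat.pow_pos (by norm_num)
      split_ifs <;> simp [List.map_append, List.sum_append] <;> omega

def solution (temperature : Int) (t1 : Int) (t2 : Int) (a : Int) (b : Int) (onboard : List Int) : Int :=
  -- (`check`, the int inits of `result`/`count` in the Python source are dead code)
  if h0 : onboard.length = 0 then 0  -- Python raises IndexError (p[0]) here; excluded by Pre_solution
  else
    (PySem.List.min? (bfsA temperature t1 t2 a b onboard
        [(temperature, 0, ⟨0, Nat.pos_of_ne_zero h0⟩)] []) (fun x => x)).getD 0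
    -- min([]) raises ValueError in Python when no schedule survives; excluded by Pre_solution

-- ===== PORT B =====
-- helper `alive(i, c)` of Source B
def aliveB (t1 t2 : Int) (onboard : List Int) (i c : Int) : Bool :=
  decide ((t1 ≤ c ∧ c ≤ t2) ∨ PySem.List.pyGetD onboard i 0 ≠ 1)

-- helper `moves(c)` of Source B
def movesB (t t1 t2 a b c : Int) : List (Int × Int) :=
  (if c > t then (c - 1, 0) else if c < t then (c + 1, 0) else (c, 0)) ::
  (if c > t2 then [(c - 1, a)]
   else if c < t1 then [(c + 1, a)]
   else if t1 ≤ c ∧ c ≤ t2 then [(c, b), (c + 1, a), (c - 1, a)]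
   else [])

-- the initial comprehension `{c: (0 if alive(n-1,c) else None) for c in range(t-(n-1), t+n)}`
def initB (t t1 t2 : Int) (onboard : List Int) : PySem.Dict Int (Option Int) :=
  (PySem.List.pyRange (t - ((onboard.length : Int) - 1)) (t + (onboard.length : Int)) 1).foldl
    (fun d c => d.insert c (if aliveB t1 t2 onboard ((onboard.length : Int) - 1) c then some (0 : Int) else none))
    PySem.Dict.empty

-- one iteration of Source B's `for k in range(1, n)` loop body (builds `nxt` from `cur`)
def rowB (t t1 t2 a b : Int) (onboard : List Int) (cur : PySem.Dict Int (Option Int)) (k : Int) :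
    PySem.Dict Int (Option Int) :=
  let i := (onboard.length : Int) - 1 - k
  (PySem.List.pyRange (t - i) (t + i + 1) 1).foldl
    (fun nxt c =>
      if ! aliveB t1 t2 onboard i c then nxt.insert c none
      else
        nxt.insert c ((movesB t t1 t2 a b c).foldl
          (fun best m =>
            match (cur.get? m.1).getD none with  -- cur[c2]; the key is always present
            | none => best
            | some v =>
              match best with
              | none => some (m.2 + v)
              | some bb => if m.2 + v < bb then some (m.2 + v) else best)
          none))
    PySem.Dict.empty

def solution_alt (temperature : Int) (t1 : Int) (t2 : Int) (a : Int) (b : Int) (onboard : List Int) : Int :=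
  let cur := (PySem.List.pyRange 1 (onboard.length : Int) 1).foldl
    (rowB temperature t1 t2 a b onboard) (initB temperature t1 t2 onboard)
  ((cur.get? temperature).getD none).getD 0
  -- `return cur[t]` — on empty onboard Python B raises KeyError, on infeasible inputs it
  -- returns None; both are excluded by Pre_solution

-- ===== PRECONDITION & SPEC =====
-- Pre_ excludes exactly the inputs where the Python A raises: an empty onboard list
-- (IndexError on p[0]) and inputs where some time with onboard[i] == 1 is too early for the
-- cabin temperature to have reached the comfort band [t1, t2], so A's result list is empty
-- and min([]) raises ValueError.
def Pre_solution (temperature : Int) (t1 : Int) (t2 : Int) (a : Int) (b : Int) (onboard : List Int) : Prop :=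
  onboard ≠ [] ∧ ∀ i : Nat, i < onboard.length → onboard.getD i 0 = 1 →
    t1 ≤ t2 ∧ t1 - temperature ≤ (i : Int) ∧ temperature - t2 ≤ (i : Int)
instance (temperature : Int) (t1 : Int) (t2 : Int) (a : Int) (b : Int) (onboard : List Int) : Decidable (Pre_solution temperature t1 t2 a b onboard) := by unfold Pre_solution; infer_instance

def pvWitness_solution : Int × Int × Int × Int × Int × List Int := (5, 4, 6, 2, 1, [1, 0, 1])

def Spec_solution (temperature : Int) (t1 : Int) (t2 : Int) (a : Int) (b : Int) (onboard : List Int) (out : Int) : Prop := out = solution_alt temperature t1 t2 a b onboard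
instance (temperature : Int) (t1 : Int) (t2 : Int) (a : Int) (b : Int) (onboard : List Int) (out : Int) : Decidable (Spec_solution temperature t1 t2 a b onboard out) := by unfold Spec_solution; infer_instance

-- ===== CLAIM (what is proved, stated in full; the proofs are below) =====
def Claim_equal_solution : Prop := ∀ (temperature : Int) (t1 : Int) (t2 : Int) (a : Int) (b : Int) (onboard : List Int), Dom_solution temperature t1 t2 a b onboard → Pre_solution temperature t1 t2 a b onboard → Spec_solution temperature t1 t2 a b onboard (solution temperature t1 t2 a b onboard)

-- ===== LEMMAS AND PROOFS =====

-- `min` on `Option Int` (`none` = no value yet); the common value both programs compute.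
def omin : Option Int → Option Int → Option Int
  | none, v => v
  | some x, none => some x
  | some x, some y => some (min x y)

-- Wf k c = minimal future energy of A's search from temperature c with k steps remaining
-- (time = p.length - 1 - k), none if no surviving schedule.
def Wf (t t1 t2 a b : Int) (p : List Int) : Nat → Int → Option Int
  | 0, c => if aliveB t1 t2 p ((p.length : Int) - 1) c then some 0 else none
  | (k+1), c =>
    if aliveB t1 t2 p ((p.length : Int) - 1 - ((k : Int) + 1)) c then
      (movesB t t1 t2 a b c).foldl
        (fun best m => omin best ((Wf t t1 t2 a b p k m.1).map (fun v => m.2 + v))) none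
    else none

lemma omin_none_right (u : Option Int) : omin u none = u := by cases u <;> rfl

lemma omin_assoc (u v w : Option Int) : omin (omin u v) w = omin u (omin v w) := by
  cases u <;> cases v <;> cases w <;> simp [omin, min_assoc]

lemma omin_comm (u v : Option Int) : omin u v = omin v u := by
  cases u <;> cases v <;> simp [omin, min_comm]

lemma foldr_omin_append {α : Type} (f : α → Option Int) (l1 l2 : List α) :
    (l1 ++ l2).foldr (fun x r => omin (f x) r) none
      = omin (l1.foldr (fun x r => omin (f x) r) none) (l2.foldr (fun x r => omin (f x) r) none) := by
  induction l1 with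
  | nil => rfl
  | cons x l ih => simp [List.foldr_cons, ih, omin_assoc]

lemma foldl_omin_eq_foldr {α : Type} (f : α → Option Int) (l : List α) (u : Option Int) :
    l.foldl (fun acc x => omin acc (f x)) u = omin u (l.foldr (fun x r => omin (f x) r) none) := by
  induction l generalizing u with
  | nil => simp [omin_none_right]
  | cons x l ih => simp [List.foldl_cons, ih, omin_assoc]

lemma omin_map_add (e : Int) (u v : Option Int) :
    (omin u v).map (fun x => e + x) = omin (u.map (fun x => e + x)) (v.map (fun x => e + x)) := by
  cases u <;> cases v <;> simp [omin]

lemma map_add_foldr_omin {α : Type} (e : Int) (f : α → Option Int) (l : List α) :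
    (l.foldr (fun x r => omin (f x) r) none).map (fun v => e + v)
      = l.foldr (fun x r => omin ((f x).map (fun v => e + v)) r) none := by
  induction l with
  | nil => rfl
  | cons x l ih => simp [List.foldr_cons, omin_map_add, ih]

-- min over a list of Ints as a foldr of omin
def lmin (l : List Int) : Option Int := l.foldr (fun x r => omin (some x) r) none

lemma foldl_min_eq (u : List Int) : ∀ m y : Int, min m (u.foldl min y) = u.foldl min (min m y) := by
  induction u with
  | nil => intro m y; rfl
  | cons z u ih =>
    intro m y
    simp only [List.foldl_cons]
    rw [ih, ← min_assoc]

lemma lmin_cons_eq (t : List Int) : ∀ x : Int, lmin (x :: t) = some (t.foldl min x) := by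
  induction t with
  | nil => intro x; rfl
  | cons y u ih =>
    intro x
    show omin (some x) (lmin (y :: u)) = _
    rw [ih y]
    simp only [omin, List.foldl_cons]
    rw [foldl_min_eq]

lemma min?_eq_lmin (l : List Int) : PySem.List.min? l (fun x => x) = lmin l := by
  cases l with
  | nil => rfl
  | cons x t => rw [PySem.List.min?_id_cons, lmin_cons_eq]

lemma lmin_append (l1 l2 : List Int) : lmin (l1 ++ l2) = omin (lmin l1) (lmin l2) :=
  foldr_omin_append some l1 l2

-- value of a queue entry: its energy plus the minimal future energy of its state
def sval (t t1 t2 a b : Int) (p : List Int) (x : Int × Int × Fin p.length) : Option Int :=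
  (Wf t t1 t2 a b p (p.length - 1 - x.2.2.val) x.1).map (fun v => x.2.1 + v)

def qmin (t t1 t2 a b : Int) (p : List Int) (q : List (Int × Int × Fin p.length)) : Option Int :=
  q.foldr (fun x r => omin (sval t t1 t2 a b p x) r) none

lemma qmin_cons (t t1 t2 a b : Int) (p : List Int) (x : Int × Int × Fin p.length)
    (q : List (Int × Int × Fin p.length)) :
    qmin t t1 t2 a b p (x :: q) = omin (sval t t1 t2 a b p x) (qmin t t1 t2 a b p q) := rfl

lemma qmin_append (t t1 t2 a b : Int) (p : List Int) (q1 q2 : List (Int × Int × Fin p.length)) :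
    qmin t t1 t2 a b p (q1 ++ q2) = omin (qmin t t1 t2 a b p q1) (qmin t t1 t2 a b p q2) :=
  foldr_omin_append _ q1 q2

lemma Wf_of_not_alive (t t1 t2 a b : Int) (p : List Int) (k : Nat) (c : Int)
    (h : aliveB t1 t2 p ((p.length : Int) - 1 - (k : Int)) c = false) :
    Wf t t1 t2 a b p k c = none := by
  cases k with
  | zero => simp only [Wf]; simp at h ⊢; simp [h]
  | succ k => simp only [Wf]; push_cast at h ⊢; simp [h]

lemma moves_target (t t1 t2 a b c : Int) :
    ∀ m ∈ movesB t t1 t2 a b c, m.1 = c - 1 ∨ m.1 = c ∨ m.1 = c + 1 := by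
  intro m hm
  simp only [movesB] at hm
  split_ifs at hm <;> simp at hm <;> rcases hm with h | h | h | h <;> simp_all

-- A's queue appends from state (c, e, time) are exactly movesB shifted by e
lemma children_eq (t t1 t2 a b : Int) (p : List Int) (c e : Int) (nt : Fin p.length) :
    ((if c = t then [(c, e, nt)]
      else if c > t then [(c - 1, e, nt)]
      else [(c + 1, e, nt)])
     ++ (if c > t2 then [(c - 1, e + a, nt)]
         else if c < t1 then [(c + 1, e + a, nt)]
         else if t1 ≤ c ∧ c ≤ t2 then [(c, e + b, nt), (c + 1, e + a, nt), (c - 1, e + a, nt)]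
         else []))
    = (movesB t t1 t2 a b c).map (fun m => (m.1, e + m.2, nt)) := by
  simp only [movesB, List.map_cons]
  split_ifs <;> simp_all <;> omega

-- the heart of the A-side proof: min over everything bfsA will ever collect
lemma bfsA_lmin (t t1 t2 a b : Int) (p : List Int) :
    ∀ (q : List (Int × Int × Fin p.length)) (acc : List Int),
      lmin (bfsA t t1 t2 a b p q acc) = omin (lmin acc) (qmin t t1 t2 a b p q) := by
  intro q acc
  fun_induction bfsA t t1 t2 a b p q acc with
  | case1 result => exact (omin_none_right _).symm
  | case2 c e time q result h ih =>
    have hlt := time.isLt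
    have halive : aliveB t1 t2 p ((p.length : Int) - 1 - ((p.length - 1 - time.val : Nat) : Int)) c = false := by
      rw [show ((p.length - 1 - time.val : Nat) : Int) = (p.length : Int) - 1 - (time.val : Int) by omega,
          show (p.length : Int) - 1 - ((p.length : Int) - 1 - (time.val : Int)) = (time.val : Int) by ring]
      simp only [aliveB, decide_eq_false_iff_not]
      exact fun hor => hor.elim h.1 (fun hne => hne h.2)
    have hsval : sval t t1 t2 a b p (c, e, time) = none := by
      simp [sval, Wf_of_not_alive t t1 t2 a b p _ c halive]
    rw [ih, qmin_cons, hsval]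
    rfl
  | case3 c e time q result h1 h2 ih =>
    have hlt := time.isLt
    have hk : p.length - 1 - time.val = 0 := by omega
    have halive : aliveB t1 t2 p ((p.length : Int) - 1) c = true := by
      simp only [aliveB, decide_eq_true_eq]
      rw [show (p.length : Int) - 1 = (time.val : Int) from h2.symm]
      by_cases hr : t1 ≤ c ∧ c ≤ t2
      · exact Or.inl hr
      · exact Or.inr (fun he => h1 ⟨hr, he⟩)
    have hsval : sval t t1 t2 a b p (c, e, time) = some e := by
      simp [sval, hk, Wf, halive]
    rw [ih, lmin_append, qmin_cons, hsval]
    rw [show lmin [e] = some e from rfl, omin_assoc]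
  | case4 c e time q result h1 h2 hlt ih =>
    refine ih.trans ?_
    congr 1
    rw [List.append_assoc, qmin_append, qmin_cons]
    rw [omin_comm (sval t t1 t2 a b p (c, e, time)) (qmin t t1 t2 a b p q)]
    congr 1
    simp only [dite_eq_ite]
    rw [children_eq t t1 t2 a b p c e ⟨time.val + 1, hlt⟩]
    -- queue value of the expanded state = min over its children
    have hK : p.length - 1 - time.val = (p.length - 1 - (time.val + 1)) + 1 := by
      have := time.isLt; omega
    have halive : aliveB t1 t2 p ((p.length : Int) - 1 - (((p.length - 1 - (time.val + 1) : Nat) : Int) + 1)) c = true := by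
      rw [show (((p.length - 1 - (time.val + 1) : Nat)) : Int) + 1 = (p.length : Int) - 1 - (time.val : Int) by have := time.isLt; omega,
          show (p.length : Int) - 1 - ((p.length : Int) - 1 - (time.val : Int)) = (time.val : Int) by ring]
      simp only [aliveB, decide_eq_true_eq]
      by_cases hr : t1 ≤ c ∧ c ≤ t2
      · exact Or.inl hr
      · exact Or.inr (fun he => h1 ⟨hr, he⟩)
    show qmin t t1 t2 a b p _ = sval t t1 t2 a b p (c, e, time)
    rw [sval, hK]
    simp only [Wf, halive, if_true]
    rw [foldl_omin_eq_foldr]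
    show _ = (omin none _).map _
    rw [show ∀ v : Option Int, omin none v = v from fun v => rfl]
    rw [map_add_foldr_omin]
    rw [qmin]
    rw [List.foldr_map]
    simp only [sval]
    congr 1
    funext m r
    congr 1
    rw [show p.length - 1 - (⟨time.val + 1, hlt⟩ : Fin p.length).val = p.length - 1 - (time.val + 1) from rfl]
    rw [Option.map_map]
    congr 1
    funext v
    simp only [Function.comp_apply]
    ring

-- B's loop body writes nxt[c] in two branches; as one insert of a conditional value
lemma foldl_insert_ite {f g : Int → Option Int} {P : Int → Bool} (l : List Int)
    (d : PySem.Dict Int (Option Int)) :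
    l.foldl (fun nxt c => if P c then nxt.insert c (f c) else nxt.insert c (g c)) d
      = l.foldl (fun nxt c => nxt.insert c (if P c then f c else g c)) d := by
  apply PySem.List.foldl_congr_mem
  intro acc x _
  cases h : P x <;> simp [h]

-- B-side: a fold of inserts of key-determined values over a range is lookup-by-formula
lemma get?_foldl_insert_aux (f : Int → Option Int) :
    ∀ (n : Nat) (lo hi : Int), (hi - lo).toNat = n →
      ∀ (d : PySem.Dict Int (Option Int)) (c : Int),
      ((PySem.List.pyRange lo hi 1).foldl (fun d c => d.insert c (f c)) d).get? c
        = if lo ≤ c ∧ c < hi then some (f c) else d.get? c := by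
  intro n
  induction n with
  | zero =>
    intro lo hi h d c
    rw [PySem.List.pyRange_one_eq_nil (by omega)]
    simp only [List.foldl_nil]
    rw [if_neg (by omega)]
  | succ n ih =>
    intro lo hi h d c
    rw [PySem.List.pyRange_one_cons (by omega)]
    simp only [List.foldl_cons]
    rw [ih (lo + 1) hi (by omega), PySem.Dict.get?_insert]
    split_ifs <;> simp_all <;> omega

lemma get?_foldl_insert (f : Int → Option Int) (lo hi : Int)
    (d : PySem.Dict Int (Option Int)) (c : Int) :
    ((PySem.List.pyRange lo hi 1).foldl (fun d c => d.insert c (f c)) d).get? c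
      = if lo ≤ c ∧ c < hi then some (f c) else d.get? c :=
  get?_foldl_insert_aux f (hi - lo).toNat lo hi rfl d c

-- one rowB step from row j of Wf produces row j+1 of Wf
lemma rowB_get? (t t1 t2 a b : Int) (p : List Int) (cur : PySem.Dict Int (Option Int)) (j : Nat)
    (hj : (j : Int) + 1 ≤ (p.length : Int) - 1)
    (hcur : ∀ c : Int, cur.get? c
      = if t - ((p.length : Int) - 1 - (j : Int)) ≤ c ∧ c ≤ t + ((p.length : Int) - 1 - (j : Int))
        then some (Wf t t1 t2 a b p j c) else none) :
    ∀ c : Int, (rowB t t1 t2 a b p cur ((j : Int) + 1)).get? c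
      = if t - ((p.length : Int) - 1 - ((j : Int) + 1)) ≤ c ∧ c ≤ t + ((p.length : Int) - 1 - ((j : Int) + 1))
        then some (Wf t t1 t2 a b p (j + 1) c) else none := by
  intro c
  simp only [rowB]
  rw [foldl_insert_ite, get?_foldl_insert]
  rw [PySem.Dict.get?_empty]
  by_cases h1 : t - ((p.length : Int) - 1 - ((j : Int) + 1)) ≤ c ∧ c ≤ t + ((p.length : Int) - 1 - ((j : Int) + 1))
  · -- c is in the row range: the computed entry is Wf (j+1) c
    rw [if_pos (by omega), if_pos h1]
    congr 1
    cases ha : aliveB t1 t2 p ((p.length : Int) - 1 - ((j : Int) + 1)) c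
    · simp [Wf, ha]
    · simp only [Wf, ha, Bool.not_true, Bool.false_eq_true, if_false, if_true]
      apply PySem.List.foldl_congr_mem
      intro best m hm
      have h3 := moves_target t t1 t2 a b c m hm
      have hlook : cur.get? m.1 = some (Wf t t1 t2 a b p j m.1) := by
        rw [hcur m.1, if_pos (by omega)]
      rw [hlook]
      simp only [Option.getD_some]
      cases hwv : Wf t t1 t2 a b p j m.1 with
      | none => simp [omin_none_right]
      | some v =>
        cases best with
        | none => simp [omin]
        | some bb =>
          simp only [omin, Option.map_some]
          split_ifs <;> simp only [Option.some.injEq] <;> omega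
  · rw [if_neg (by omega), if_neg h1]

-- B-side invariant: after the first j loop iterations the dict is row j of Wf
lemma outer_inv (t t1 t2 a b : Int) (p : List Int) :
    ∀ (j : Nat), (j : Int) ≤ (p.length : Int) - 1 →
      ∀ c : Int,
        ((PySem.List.pyRange 1 (1 + (j : Int)) 1).foldl (rowB t t1 t2 a b p) (initB t t1 t2 p)).get? c
          = if t - ((p.length : Int) - 1 - (j : Int)) ≤ c ∧ c ≤ t + ((p.length : Int) - 1 - (j : Int))
            then some (Wf t t1 t2 a b p j c) else none := by
  intro j
  induction j with
  | zero =>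
    intro _ c
    rw [PySem.List.pyRange_one_eq_nil (by omega)]
    simp only [List.foldl_nil, Nat.cast_zero, initB]
    rw [get?_foldl_insert, PySem.Dict.get?_empty]
    split_ifs <;> first | rfl | omega | simp_all [Wf]
  | succ j ih =>
    intro hj c
    rw [show (1 + ((j + 1 : Nat) : Int)) = (1 + (j : Int)) + 1 by push_cast; ring]
    rw [PySem.List.pyRange_one_succ_right (by omega), List.foldl_append]
    simp only [List.foldl_cons, List.foldl_nil]
    have ih' := ih (by omega)
    rw [Int.add_comm 1 (j : Int)] at ih' ⊢
    rw [rowB_get? t t1 t2 a b p _ j (by omega) ih' c]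
    have hc : ((j + 1 : Nat) : Int) = (j : Int) + 1 := by push_cast; ring
    rw [hc]

-- ===== VERDICT (by name: the statement is the Claim_ definition above) =====
theorem solution_spec : Claim_equal_solution := by
  intro temperature t1 t2 a b onboard _ hpre
  unfold Spec_solution
  obtain ⟨hne, -⟩ := hpre
  have hp : 0 < onboard.length := by
    cases onboard with
    | nil => exact absurd rfl hne
    | cons x xs => simp
  simp only [solution, solution_alt]
  rw [dif_neg (by omega : ¬onboard.length = 0)]
  rw [min?_eq_lmin, bfsA_lmin, qmin_cons]
  rw [show qmin temperature t1 t2 a b onboard [] = none from rfl, omin_none_right]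
  rw [show lmin [] = none from rfl]
  rw [show ∀ v : Option Int, omin none v = v from fun v => rfl]
  have hinv := outer_inv temperature t1 t2 a b onboard (onboard.length - 1) (by omega) temperature
  rw [show (1 : Int) + ((onboard.length - 1 : Nat) : Int) = (onboard.length : Int) by omega] at hinv
  rw [if_pos (by constructor <;> omega)] at hinv
  rw [hinv]
  simp [sval]
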